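-- pv_equiv track=rewrite | github.com/durgaprasad104/youtube | app.py | generate_daily_schedule
-- ===== SOURCE A (Python) =====
-- import math
--
-- def generate_daily_schedule(videos, num_days):
--     """
--     Distributes videos across the given number of days.
--     """
--     if not videos or num_days <= 0:
--         return {}
--
--     schedule = {}
--     videos_per_day = math.ceil(len(videos) / num_days)
--
--     for i in range(num_days):
--         start_idx = i * videos_per_day
--         end_idx = start_idx + videos_per_day
--         schedule[i + 1] = videos[start_idx:end_idx]  # Day starts from 1
--
--     return schedule
-- ===== SOURCE B (Python) =====
-- import math
--
-- def generate_daily_schedule(videos, num_days):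
--     """
--     Distributes videos across the given number of days.
--
--     Pre-creates every day's (empty) slot, then scatters the videos over the
--     days in a single pass, instead of slicing one contiguous chunk per day.
--     """
--     if not videos or num_days <= 0:
--         return {}
--
--     videos_per_day = math.ceil(len(videos) / num_days)
--     schedule = {day: [] for day in range(1, num_days + 1)}
--     for i, video in enumerate(videos):
--         schedule[i // videos_per_day + 1].append(video)
--     return schedule
-- ===== Notes on version B (the rewrite author's own statement) =====
-- stated objective: alternative
-- what changed: A iterates over the days and slices one contiguous chunk of the video list per day; B pre-creates every day's empty slot and then makes a single pass over the videos, scattering each video into its day bucket by index arithmetic.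
import Mathlib
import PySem

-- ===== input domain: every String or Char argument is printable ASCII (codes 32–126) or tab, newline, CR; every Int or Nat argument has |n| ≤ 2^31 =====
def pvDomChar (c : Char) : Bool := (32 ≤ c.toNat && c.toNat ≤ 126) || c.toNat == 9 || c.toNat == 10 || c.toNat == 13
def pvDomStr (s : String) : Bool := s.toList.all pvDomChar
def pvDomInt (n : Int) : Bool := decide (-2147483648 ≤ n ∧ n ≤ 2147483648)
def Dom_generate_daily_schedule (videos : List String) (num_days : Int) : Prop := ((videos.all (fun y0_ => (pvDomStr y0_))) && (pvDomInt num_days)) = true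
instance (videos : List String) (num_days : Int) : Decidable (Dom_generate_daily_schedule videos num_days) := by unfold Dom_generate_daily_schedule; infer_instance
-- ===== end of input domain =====

-- B pre-creates all day slots and scatters the videos in one pass, instead of slicing one chunk per day (alternative decomposition, same cost).

-- ===== PORT A =====
-- math.ceil(len(videos)/num_days) is ported as the exact ceiling -((-len) // num_days);
-- on this domain (1 ≤ len < 2^52, 1 ≤ num_days ≤ 2^31) the float ceil agrees with the exact ceiling.
def generate_daily_schedule (videos : List String) (num_days : Int) : List (Int × List String) :=
  if videos.isEmpty ∨ num_days ≤ 0 then []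
  else
    let videos_per_day : Int := -(PySem.Int.floordiv (-(videos.length : Int)) num_days)
    ((PySem.List.pyRange 0 num_days 1).foldl
      (fun (schedule : PySem.Dict Int (List String)) i =>
        schedule.insert (i + 1)
          (PySem.List.slice videos (some (i * videos_per_day)) (some (i * videos_per_day + videos_per_day))))
      PySem.Dict.empty).items

-- ===== PORT B =====
def generate_daily_schedule_alt (videos : List String) (num_days : Int) : List (Int × List String) :=
  if videos.isEmpty ∨ num_days ≤ 0 then []
  else
    let videos_per_day : Int := -(PySem.Int.floordiv (-(videos.length : Int)) num_days)
    let schedule0 : PySem.Dict Int (List String) :=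
      (PySem.List.pyRange 1 (num_days + 1) 1).foldl
        (fun d day => d.insert day ([] : List String)) PySem.Dict.empty
    ((PySem.List.enumerate videos 0).foldl
      (fun d p => d.modify (PySem.Int.floordiv p.1 videos_per_day + 1) [] (· ++ [p.2]))
      schedule0).items

-- ===== PRECONDITION & SPEC =====
def Spec_generate_daily_schedule (videos : List String) (num_days : Int) (out : List (Int × List String)) : Prop := out = generate_daily_schedule_alt videos num_days
instance (videos : List String) (num_days : Int) (out : List (Int × List String)) : Decidable (Spec_generate_daily_schedule videos num_days out) := by unfold Spec_generate_daily_schedule; infer_instance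

-- ===== CLAIM (what is proved, stated in full; the proofs are below) =====
def Claim_equal_generate_daily_schedule : Prop := ∀ (videos : List String) (num_days : Int), Dom_generate_daily_schedule videos num_days → Spec_generate_daily_schedule videos num_days (generate_daily_schedule videos num_days)

-- ===== LEMMAS AND PROOFS =====

-- getD over the initial all-empty loop is always []
lemma pv_getD_init_nil (c : Int) :
    ∀ (ks : List Int) (d0 : PySem.Dict Int (List String)), d0.getD c [] = [] →
      ((ks.foldl (fun d day => d.insert day ([] : List String)) d0).getD c []) = [] := by
  intro ks
  induction ks with
  | nil => intro d0 h; simpa using h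
  | cons k ks ih =>
    intro d0 h
    simp only [List.foldl_cons]
    apply ih
    rw [PySem.Dict.getD_insert]
    split_ifs <;> simp [h]

-- keys of the initial all-empty loop: fresh distinct keys append
lemma pv_keys_init :
    ∀ (ks : List Int) (d0 : PySem.Dict Int (List String)),
      (∀ k ∈ ks, d0.contains k = false) → ks.Nodup →
      ((ks.foldl (fun d day => d.insert day ([] : List String)) d0).keys) = d0.keys ++ ks := by
  intro ks
  induction ks with
  | nil => intro d0 _ _; simp
  | cons k ks ih =>
    intro d0 hf hnd
    simp only [List.foldl_cons]
    rw [ih _ ?_ hnd.of_cons]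
    · rw [PySem.Dict.keys_insert_of_not_contains _ _ (hf k (by simp))]
      simp
    · intro k' hk'
      rw [PySem.Dict.contains_insert]
      have hne : (k' == k) = false := by
        simp only [beq_eq_false_iff_ne, ne_eq]
        intro h; exact (List.nodup_cons.mp hnd).1 (h ▸ hk')
      rw [hne, hf k' (by simp [hk'])]
      simp

-- A's day loop: items of a fold inserting fresh distinct keys
lemma pv_items_dayloop (videos : List String) (vpd : Int) :
    ∀ (l : List Int) (d0 : PySem.Dict Int (List String)),
      (∀ i ∈ l, d0.contains (i + 1) = false) → l.Nodup →
      ((l.foldl (fun (schedule : PySem.Dict Int (List String)) i =>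
          schedule.insert (i + 1)
            (PySem.List.slice videos (some (i * vpd)) (some (i * vpd + vpd)))) d0).items)
        = d0.items ++ l.map (fun i => (i + 1,
            PySem.List.slice videos (some (i * vpd)) (some (i * vpd + vpd)))) := by
  intro l
  induction l with
  | nil => intro d0 _ _; simp
  | cons i l ih =>
    intro d0 hf hnd
    simp only [List.foldl_cons, List.map_cons]
    rw [ih _ ?_ hnd.of_cons]
    · rw [PySem.Dict.items_insert_of_not_contains _ _ (hf i (by simp))]
      simp
    · intro i' hi'
      rw [PySem.Dict.contains_insert]
      have hne : ((i' + 1 : Int) == i + 1) = false := by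
        simp only [beq_eq_false_iff_ne, ne_eq]
        intro h
        have hii : i' = i := by omega
        exact (List.nodup_cons.mp hnd).1 (hii ▸ hi')
      rw [hne, hf i' (by simp [hi'])]
      simp

-- B's scatter loop: keys are unchanged when every touched key is already present
lemma pv_keys_scatter (vpd : Int) :
    ∀ (l : List (Int × String)) (d0 : PySem.Dict Int (List String)),
      (∀ p ∈ l, d0.contains (PySem.Int.floordiv p.1 vpd + 1) = true) →
      ((l.foldl (fun d p =>
          d.modify (PySem.Int.floordiv p.1 vpd + 1) [] (· ++ [p.2])) d0).keys) = d0.keys := by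
  intro l
  induction l with
  | nil => intro d0 _; rfl
  | cons p l ih =>
    intro d0 h
    simp only [List.foldl_cons]
    rw [ih _ ?_]
    · rw [PySem.Dict.keys_modify]
      exact PySem.Dict.keys_insert_of_contains _ _ (h p (by simp))
    · intro q hq
      rw [PySem.Dict.contains_modify]
      rw [h q (by simp [hq])]
      simp

-- B's scatter loop: the bucket of day c collects exactly the videos filtered to it
lemma pv_getD_scatter (vpd c : Int) :
    ∀ (l : List (Int × String)) (d0 : PySem.Dict Int (List String)),
      ((l.foldl (fun d p =>
          d.modify (PySem.Int.floordiv p.1 vpd + 1) [] (· ++ [p.2])) d0).getD c [])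
        = d0.getD c [] ++
            ((l.filter (fun p => PySem.Int.floordiv p.1 vpd + 1 == c)).map (·.2)) := by
  intro l
  induction l with
  | nil => intro d0; simp
  | cons p l ih =>
    intro d0
    simp only [List.foldl_cons, List.filter_cons]
    by_cases hc : (PySem.Int.floordiv p.1 vpd + 1 == c) = true
    · rw [if_pos hc, ih]
      have hce : c = PySem.Int.floordiv p.1 vpd + 1 := (beq_iff_eq.mp hc).symm
      rw [PySem.Dict.getD_modify, if_pos hce, hce]
      simp
    · rw [if_neg hc, ih]
      congr 1
      rw [PySem.Dict.getD_modify, if_neg]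
      intro h
      exact hc (beq_iff_eq.mpr h.symm)

-- crux: filtering the enumeration down to day i's indices yields the i-th length-v chunk
lemma pv_crux (v i : Nat) (hv : 0 < v) :
    ∀ (xs : List String) (s : Nat),
      (((PySem.List.enumerate xs (s : Int)).filter
          (fun p => PySem.Int.floordiv p.1 (v : Int) + 1 == 1 + (i : Int))).map (·.2))
        = (xs.drop (i * v - s)).take ((i * v + v) - max s (i * v)) := by
  intro xs
  induction xs with
  | nil => intro s; simp [PySem.List.enumerate_nil]
  | cons x xs ih =>
    intro s
    rw [PySem.List.enumerate_cons]
    have hcast : (s : Int) + 1 = ((s + 1 : Nat) : Int) := by push_cast; ring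
    rw [hcast]
    have hdm := Nat.div_add_mod s v
    have hmlt := Nat.mod_lt s hv
    by_cases hq : s / v = i
    · have hb : (PySem.Int.floordiv ((s : Nat) : Int) (v : Int) + 1 == 1 + (i : Int)) = true := by
        rw [PySem.Int.floordiv_natCast, beq_iff_eq, hq]; ring
      simp only [List.filter_cons]
      rw [if_pos hb, List.map_cons, ih (s + 1)]
      rw [hq, Nat.mul_comm] at hdm
      generalize hM : i * v = M at hdm ⊢
      have h1 : M - s = 0 := by omega
      have h1' : M - (s + 1) = 0 := by omega
      have h2 : (M + v) - max s M = ((M + v) - max (s + 1) M) + 1 := by omega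
      rw [h1, h1', h2, List.drop_zero, List.drop_zero, List.take_succ_cons]
    · have hb : (PySem.Int.floordiv ((s : Nat) : Int) (v : Int) + 1 == 1 + (i : Int)) = false := by
        rw [PySem.Int.floordiv_natCast]
        simp only [beq_eq_false_iff_ne, ne_eq]
        intro h
        exact hq (by exact_mod_cast (by omega : ((s / v : Nat) : Int) = (i : Int)))
      simp only [List.filter_cons]
      rw [if_neg (by rw [hb]; exact Bool.false_ne_true), ih (s + 1)]
      rcases Nat.lt_or_ge (s / v) i with hlt | hgt
      · have hsv : s < i * v := (Nat.div_lt_iff_lt_mul hv).mp hlt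
        generalize hM : i * v = M at hsv ⊢
        have h1 : M - s = (M - (s + 1)) + 1 := by omega
        have h2 : (M + v) - max s M = (M + v) - max (s + 1) M := by omega
        rw [h1, h2, List.drop_succ_cons]
      · have hgt' : i < s / v := lt_of_le_of_ne hgt (fun h => hq h.symm)
        have hsv' : (i + 1) * v ≤ s := (Nat.le_div_iff_mul_le hv).mp hgt'
        rw [Nat.succ_mul] at hsv'
        generalize hM : i * v = M at hsv' ⊢
        have h2 : (M + v) - max s M = 0 := by omega
        have h2' : (M + v) - max (s + 1) M = 0 := by omega
        rw [h2, h2', List.take_zero, List.take_zero]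

-- ===== VERDICT (by name: the statement is the Claim_ definition above) =====
theorem generate_daily_schedule_spec : Claim_equal_generate_daily_schedule := by
  intro videos num_days _hdom
  unfold Spec_generate_daily_schedule generate_daily_schedule generate_daily_schedule_alt
  by_cases hg : videos.isEmpty ∨ num_days ≤ 0
  · rw [if_pos hg, if_pos hg]
  · rw [if_neg hg, if_neg hg]
    simp only []
    obtain ⟨hne, hdle⟩ := not_or.mp hg
    have hdpos : 0 < num_days := by omega
    have hnpos : 0 < videos.length := by
      cases videos with
      | nil => exact absurd rfl hne
      | cons a l => simp
    set vpd : Int := -(PySem.Int.floordiv (-(videos.length : Int)) num_days) with hvpd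
    obtain ⟨hc1, hc2⟩ := (PySem.Int.neg_floordiv_neg_eq_iff_of_pos
        (a := (videos.length : Int)) (b := num_days) (q := vpd) hdpos).mp rfl
    have hv1 : 0 < vpd := by
      by_contra hle0
      have hle : vpd ≤ 0 := by omega
      have hmn : vpd * num_days ≤ 0 := mul_nonpos_iff.mpr (Or.inr ⟨hle, hdpos.le⟩)
      have hz : (0 : Int) < videos.length := by exact_mod_cast hnpos
      linarith
    set v : Nat := vpd.toNat with hvdef
    have hvcast : (v : Int) = vpd := Int.toNat_of_nonneg hv1.le
    have hvpos : 0 < v := by omega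
    set dn : Nat := num_days.toNat with hdndef
    have hdcast : (dn : Int) = num_days := Int.toNat_of_nonneg hdpos.le
    have hnle : videos.length ≤ v * dn := by
      have h : (videos.length : Int) ≤ (v : Int) * (dn : Int) := by rw [hvcast, hdcast]; exact hc2
      exact_mod_cast h
    -- A side: fresh distinct keys, so items are just the per-day list
    rw [pv_items_dayloop videos vpd (PySem.List.pyRange 0 num_days 1) PySem.Dict.empty
        (fun i _ => PySem.Dict.contains_empty _) (PySem.List.nodup_pyRange_one 0 num_days)]
    -- B side: keys of schedule0
    have hkeys0 : ((PySem.List.pyRange 1 (num_days + 1) 1).foldl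
        (fun d day => d.insert day ([] : List String)) PySem.Dict.empty).keys
        = PySem.List.pyRange 1 (num_days + 1) 1 := by
      rw [pv_keys_init _ _ (fun k _ => PySem.Dict.contains_empty _)
          (PySem.List.nodup_pyRange_one 1 (num_days + 1))]
      simp [PySem.Dict.keys_empty]
    -- every video's day key is one of schedule0's keys
    have hkey : ∀ p ∈ PySem.List.enumerate videos 0,
        1 ≤ PySem.Int.floordiv p.1 vpd + 1 ∧ PySem.Int.floordiv p.1 vpd + 1 < num_days + 1 := by
      intro p hp
      obtain ⟨k, hk, rfl⟩ := (PySem.List.mem_enumerate_iff _ _ _).mp hp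
      have hfst : ((0 : Int) + (k : Nat), videos[k]).1 = ((k : Nat) : Int) := by simp
      rw [hfst, ← hvcast, PySem.Int.floordiv_natCast]
      have hklt : k / v < dn := by
        rw [Nat.div_lt_iff_lt_mul hvpos]
        calc k < videos.length := hk
          _ ≤ v * dn := hnle
          _ = dn * v := Nat.mul_comm v dn
      constructor
      · have : (0 : Int) ≤ ((k / v : Nat) : Int) := Int.natCast_nonneg _
        omega
      · have : ((k / v : Nat) : Int) < (dn : Int) := by exact_mod_cast hklt
        omega
    have hcont : ∀ p ∈ PySem.List.enumerate videos 0,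
        (((PySem.List.pyRange 1 (num_days + 1) 1).foldl
          (fun d day => d.insert day ([] : List String)) PySem.Dict.empty).contains
            (PySem.Int.floordiv p.1 vpd + 1)) = true := by
      intro p hp
      rw [PySem.Dict.contains_iff_mem_keys, hkeys0]
      exact PySem.List.mem_pyRange_one.mpr (hkey p hp)
    have hKeysF : ((PySem.List.enumerate videos 0).foldl
        (fun d p => d.modify (PySem.Int.floordiv p.1 vpd + 1) [] (· ++ [p.2]))
        ((PySem.List.pyRange 1 (num_days + 1) 1).foldl
          (fun d day => d.insert day ([] : List String)) PySem.Dict.empty)).keys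
        = PySem.List.pyRange 1 (num_days + 1) 1 := by
      rw [pv_keys_scatter vpd _ _ hcont]
      exact hkeys0
    have hNodupF : ((PySem.List.enumerate videos 0).foldl
        (fun d p => d.modify (PySem.Int.floordiv p.1 vpd + 1) [] (· ++ [p.2]))
        ((PySem.List.pyRange 1 (num_days + 1) 1).foldl
          (fun d day => d.insert day ([] : List String)) PySem.Dict.empty)).keys.Nodup := by
      rw [hKeysF]; exact PySem.List.nodup_pyRange_one _ _
    have hgetD : ∀ c : Int, (((PySem.List.enumerate videos 0).foldl
        (fun d p => d.modify (PySem.Int.floordiv p.1 vpd + 1) [] (· ++ [p.2]))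
        ((PySem.List.pyRange 1 (num_days + 1) 1).foldl
          (fun d day => d.insert day ([] : List String)) PySem.Dict.empty)).getD c [])
        = (((PySem.List.enumerate videos 0).filter
            (fun p => PySem.Int.floordiv p.1 vpd + 1 == c)).map (·.2)) := by
      intro c
      rw [pv_getD_scatter vpd c, pv_getD_init_nil c _ _ (by simp [PySem.Dict.getD_empty])]
      simp
    rw [PySem.Dict.items_eq_map_keys _ hNodupF ([] : List String), hKeysF]
    simp only [hgetD]
    have hempty : (PySem.Dict.empty : PySem.Dict Int (List String)).items = [] := rfl
    rw [hempty, List.nil_append]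
    rw [PySem.List.pyRange_one 0 num_days, PySem.List.pyRange_one 1 (num_days + 1)]
    have hr : (num_days + 1 - 1).toNat = (num_days - 0).toNat := by omega
    rw [hr, List.map_map, List.map_map]
    apply List.map_congr_left
    intro k hk
    simp only [Function.comp_apply]
    have hcrux := pv_crux v k hvpos videos 0
    simp only [Nat.cast_zero, Nat.sub_zero, Nat.zero_max, Nat.add_sub_cancel_left] at hcrux
    rw [hvcast] at hcrux
    rw [hcrux]
    have hs2 : ((0 : Int) + (k : Int)) * vpd + vpd = ((k * v : Nat) : Int) + ((v : Nat) : Int) := by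
      rw [← hvcast]; push_cast; ring
    have hs1 : ((0 : Int) + (k : Int)) * vpd = ((k * v : Nat) : Int) := by
      rw [← hvcast]; push_cast; ring
    rw [hs2, hs1, PySem.List.slice_natCast_add]
    have hk1 : (0 : Int) + (k : Int) + 1 = 1 + (k : Int) := by ring
    rw [hk1]
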